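-- pv_equiv track=rewrite | github.com/VladLys0v/1Public | Maze runner/Maze runner.py | found
-- ===== SOURCE A (Python) =====
-- def found(pathArr, finPoint):
--     weight = 1
--     for i in range(len(pathArr) * len(pathArr[0])):
--         for y in range(len(pathArr)):
--             for x in range(len(pathArr[y])):
--                 if pathArr[y][x] == weight:
--                     # Вниз
--                     if y > 0 and pathArr[y - 1][x] == 0:
--                         pathArr[y - 1][x] = weight + 1
--                         # Вверх
--                     if y < (len(pathArr) - 1) and pathArr[y + 1][x] == 0:
--                         pathArr[y + 1][x] = weight + 1
--                     # Вправо
--                     if x > 0 and pathArr[y][x - 1] == 0: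
--                         pathArr[y][x - 1] = weight + 1
--                     # Влево
--                     if x < (len(pathArr[y]) - 1) and pathArr[y][x + 1] == 0:
--                         pathArr[y][x + 1] = weight + 1
--                     # Конечная точка
--                     if (abs(y - finPoint[0]) + abs(x - finPoint[1])) == 1:
--                         pathArr[finPoint[0]][finPoint[1]] = weight + 1
--                         return True
--         weight += 1
--     return False
-- ===== SOURCE B (Python) =====
-- def found(pathArr, finPoint):
--     # Layered multi-source BFS with a frontier queue: one pass over the grid to
--     # bucket seed cells by their value, then each cell is expanded at most once.
--     # Unlike A, pathArr is NOT mutated; equivalence is about the return value.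
--     n = len(pathArr)
--     limit = n * len(pathArr[0])
--     seeds = {}
--     for y, row in enumerate(pathArr):
--         for x, v in enumerate(row):
--             if 1 <= v <= limit:
--                 seeds.setdefault(v, []).append((y, x))
--     claimed = set()
--     carried = []
--     for w in range(1, limit + 1):
--         frontier = seeds.get(w, []) + carried
--         carried = []
--         for y, x in frontier:
--             if abs(y - finPoint[0]) + abs(x - finPoint[1]) == 1:
--                 return True
--             for p in ((y - 1, x), (y + 1, x), (y, x - 1), (y, x + 1)):
--                 if 0 <= p[0] < n and 0 <= p[1] < len(pathArr[p[0]]) \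
--                         and pathArr[p[0]][p[1]] == 0 and p not in claimed:
--                     claimed.add(p)
--                     carried.append(p)
--     return False
-- ===== Notes on version B (the rewrite author's own statement) =====
-- stated objective: faster
-- what changed: A repeatedly rescans the whole grid once per weight level (N*M full scans, each O(N*M)); B buckets the seed cells by value in one pass and then runs a layered multi-source BFS with a frontier queue and a claimed-set, expanding every cell at most once; B also does not mutate pathArr.
-- outside the precondition, e.g. on found([[1, 0], [0]], (1, 0)): A returns True, B returns True; on found([[1, -1], [-1, -1]], (2, 0)): A returns False, B returns False
import Mathlib
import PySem

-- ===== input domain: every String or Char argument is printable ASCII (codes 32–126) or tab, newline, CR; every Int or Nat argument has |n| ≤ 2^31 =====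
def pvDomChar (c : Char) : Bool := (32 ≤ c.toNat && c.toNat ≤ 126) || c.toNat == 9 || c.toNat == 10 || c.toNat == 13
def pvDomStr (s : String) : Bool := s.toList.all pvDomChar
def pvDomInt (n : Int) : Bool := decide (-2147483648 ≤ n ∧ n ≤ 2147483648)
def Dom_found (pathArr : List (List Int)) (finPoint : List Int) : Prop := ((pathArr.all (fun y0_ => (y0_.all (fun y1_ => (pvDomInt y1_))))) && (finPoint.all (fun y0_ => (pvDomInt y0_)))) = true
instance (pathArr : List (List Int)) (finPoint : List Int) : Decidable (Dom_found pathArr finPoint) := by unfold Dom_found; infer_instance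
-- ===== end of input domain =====

-- B replaces A's repeated full-grid wave scans (O((N·M)^2)) by a layered multi-source BFS
-- with a frontier queue (O(N·M)); A mutates pathArr in place, B does not — the equivalence
-- proved here is about the RETURN value only.

-- ===== PORT A =====
-- `pathArr[y][x] = v` (y, x known in range)
def pvSet2 (g : List (List Int)) (y x : Nat) (v : Int) : List (List Int) :=
  g.set y ((g.getD y []).set x v)

-- one Python statement `if C and pathArr[ny][nx] == 0: pathArr[ny][nx] = weight + 1`
def pvClaimA (g : List (List Int)) (c : Prop) [Decidable c] (ny nx : Nat) (v : Int) :
    List (List Int) :=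
  if c ∧ (g.getD ny []).getD nx 0 = 0 then pvSet2 g ny nx v else g

-- body of the innermost loop; `none` = Python executed `return True`
-- (Python also writes pathArr[finPoint[0]][finPoint[1]] just before `return True`;
--  that write only affects the discarded grid, never the returned Bool)
def foundCell (finPoint : List Int) (w : Int) (g : List (List Int)) (y x : Nat) :
    Option (List (List Int)) :=
  if (g.getD y []).getD x 0 = w then
    let g1 := pvClaimA g (0 < y) (y - 1) x (w + 1)                         -- Вниз
    let g2 := pvClaimA g1 (y < g1.length - 1) (y + 1) x (w + 1)           -- Вверх
    let g3 := pvClaimA g2 (0 < x) y (x - 1) (w + 1)                       -- Вправо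
    let g4 := pvClaimA g3 (x < (g3.getD y []).length - 1) y (x + 1) (w + 1)  -- Влево
    if ((y : Int) - PySem.List.pyGetD finPoint 0 0).natAbs
        + ((x : Int) - PySem.List.pyGetD finPoint 1 0).natAbs = 1 then
      none
    else some g4
  else some g

def foundRow (finPoint : List Int) (w : Int) (y : Nat) (g : List (List Int)) :
    Option (List (List Int)) :=
  (List.range (g.getD y []).length).foldl
    (fun st x => st.bind (fun g => foundCell finPoint w g y x)) (some g)

def foundScan (finPoint : List Int) (w : Int) (g : List (List Int)) :
    Option (List (List Int)) :=
  (List.range g.length).foldl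
    (fun st y => st.bind (fun g => foundRow finPoint w y g)) (some g)

-- one iteration of the outer `for i in range(...)` loop (state: weight, grid; none = returned True)
def foundStep (finPoint : List Int) (st : Option (Int × List (List Int))) (_ : Nat) :
    Option (Int × List (List Int)) :=
  match st with
  | none => none
  | some (w, g) =>
    match foundScan finPoint w g with
    | none => none
    | some g' => some (w + 1, g')

def found (pathArr : List (List Int)) (finPoint : List Int) : Bool :=
  let limit := pathArr.length * (pathArr.getD 0 []).length
  -- none = the loop executed `return True`; a surviving state falls through to `return False`
  ((List.range limit).foldl (foundStep finPoint) (some ((1 : Int), pathArr))).isNone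

-- ===== PORT B =====
-- one neighbour tuple p: claim it if it is an unclaimed in-bounds 0-cell
def pvAltClaim (pathArr : List (List Int)) (n : Nat)
    (st : PySem.Set (Int × Int) × List (Int × Int)) (p : Int × Int) :
    PySem.Set (Int × Int) × List (Int × Int) :=
  if 0 ≤ p.1 ∧ p.1 < (n : Int) ∧ 0 ≤ p.2 ∧ p.2 < ((pathArr.getD p.1.toNat []).length : Int)
      ∧ (pathArr.getD p.1.toNat []).getD p.2.toNat 0 = 0 ∧ p ∉ st.1 then
    (st.1.add p, st.2 ++ [p])
  else st

-- one frontier cell; `none` = Python executed `return True`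
def pvAltCell (pathArr : List (List Int)) (n : Nat) (finPoint : List Int)
    (st : PySem.Set (Int × Int) × List (Int × Int)) (c : Int × Int) :
    Option (PySem.Set (Int × Int) × List (Int × Int)) :=
  if (c.1 - PySem.List.pyGetD finPoint 0 0).natAbs
      + (c.2 - PySem.List.pyGetD finPoint 1 0).natAbs = 1 then none
  else some ([(c.1 - 1, c.2), (c.1 + 1, c.2), (c.1, c.2 - 1), (c.1, c.2 + 1)].foldl
      (pvAltClaim pathArr n) st)

def pvAltWave (pathArr : List (List Int)) (n : Nat) (finPoint : List Int)
    (frontier : List (Int × Int)) (claimed : PySem.Set (Int × Int)) :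
    Option (PySem.Set (Int × Int) × List (Int × Int)) :=
  frontier.foldl (fun st c => st.bind (fun s => pvAltCell pathArr n finPoint s c))
    (some (claimed, []))

def pvAltSeeds (pathArr : List (List Int)) (n limit : Nat) :
    PySem.Dict Int (List (Int × Int)) :=
  (List.range n).foldl (fun d y =>
    (List.range (pathArr.getD y []).length).foldl (fun d x =>
      let v := (pathArr.getD y []).getD x 0
      if 1 ≤ v ∧ v ≤ (limit : Int) then d.insert v (d.getD v [] ++ [((y : Int), (x : Int))])
      else d) d)
    PySem.Dict.empty

-- one wave `w = i + 1` of B's loop (state: claimed set, carried frontier; none = returned True)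
def pvAltStep (pathArr : List (List Int)) (n : Nat) (finPoint : List Int)
    (seeds : PySem.Dict Int (List (Int × Int)))
    (st : Option (PySem.Set (Int × Int) × List (Int × Int))) (i : Nat) :
    Option (PySem.Set (Int × Int) × List (Int × Int)) :=
  match st with
  | none => none
  | some (claimed, carried) =>
    pvAltWave pathArr n finPoint (seeds.getD ((i : Int) + 1) [] ++ carried) claimed

def found_alt (pathArr : List (List Int)) (finPoint : List Int) : Bool :=
  let n := pathArr.length
  let limit := n * (pathArr.getD 0 []).length
  let seeds := pvAltSeeds pathArr n limit
  -- none = the loop executed `return True`; a surviving state falls through to `return False`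
  ((List.range limit).foldl (pvAltStep pathArr n finPoint seeds)
      (some ((PySem.Set.empty : PySem.Set (Int × Int)), ([] : List (Int × Int))))).isNone

-- ===== PRECONDITION & SPEC =====
-- Pre_ admits the inputs on which A provably cannot raise: a nonempty grid that is either
-- QUIET (no cell value in [1, N*M], so the wave never starts and finPoint is never touched)
-- or RECTANGULAR with a finish point of ≥ 2 coordinates that is either write-safe (Python
-- negative indexing included) or too far away ever to be reached.  A also happens to return
-- on some ragged/boundary inputs whose safety depends on how far the wave spreads — that is
-- not expressible as a closed form, so such inputs stay outside; examples in claim.json.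
def Pre_found (pathArr : List (List Int)) (finPoint : List Int) : Prop :=
  pathArr ≠ [] ∧
  ((∀ row ∈ pathArr, ∀ v ∈ row,
      ¬ (1 ≤ v ∧ v ≤ ((pathArr.length * (pathArr.getD 0 []).length : Nat) : Int))) ∨
   ((∀ row ∈ pathArr, row.length = (pathArr.getD 0 []).length) ∧ 2 ≤ finPoint.length ∧
     ((-(pathArr.length : Int) ≤ finPoint.getD 0 0 ∧
         finPoint.getD 0 0 < (pathArr.length : Int) ∧
         -((pathArr.getD 0 []).length : Int) ≤ finPoint.getD 1 0 ∧
         finPoint.getD 1 0 < ((pathArr.getD 0 []).length : Int)) ∨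
      (finPoint.getD 0 0 < -1 ∨ (pathArr.length : Int) < finPoint.getD 0 0 ∨
         finPoint.getD 1 0 < -1 ∨ ((pathArr.getD 0 []).length : Int) < finPoint.getD 1 0))))

instance (pathArr : List (List Int)) (finPoint : List Int) : Decidable (Pre_found pathArr finPoint) := by
  unfold Pre_found; infer_instance

def pvWitness_found : List (List Int) × List Int := ([[1, 0], [0, 0]], [1, 1])

def Spec_found (pathArr : List (List Int)) (finPoint : List Int) (out : Bool) : Prop :=
  out = found_alt pathArr finPoint
instance (pathArr : List (List Int)) (finPoint : List Int) (out : Bool) : Decidable (Spec_found pathArr finPoint out) := by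
  unfold Spec_found; infer_instance

-- ===== CLAIM (what is proved, stated in full; the proofs are below) =====
def Claim_equal_found : Prop := ∀ (pathArr : List (List Int)) (finPoint : List Int),
  Dom_found pathArr finPoint → Pre_found pathArr finPoint →
  Spec_found pathArr finPoint (found pathArr finPoint)


-- ===== LEMMAS AND PROOFS =====

-- value of cell q of grid g (0 outside; only used in bounds)
def pvCell (g : List (List Int)) (q : Nat × Nat) : Int := (g.getD q.1 []).getD q.2 0

def pvShape (N M : Nat) (g : List (List Int)) : Prop :=
  g.length = N ∧ ∀ y, y < N → (g.getD y []).length = M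

-- 4-neighbourhood on Nat coordinates
def pvNbr (p q : Nat × Nat) : Prop :=
  (p.2 = q.2 ∧ (p.1 = q.1 + 1 ∨ q.1 = p.1 + 1)) ∨ (p.1 = q.1 ∧ (p.2 = q.2 + 1 ∨ q.2 = p.2 + 1))

def pvHit (fy fx : Int) (q : Nat × Nat) : Prop :=
  ((q.1 : Int) - fy).natAbs + ((q.2 : Int) - fx).natAbs = 1

-- cells written while scanning the processed positions P at weight w on base grid g
def pvWr (N M : Nat) (g : List (List Int)) (w : Int) (P : List (Nat × Nat)) (q : Nat × Nat) : Prop :=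
  q.1 < N ∧ q.2 < M ∧ pvCell g q = 0 ∧ ∃ p ∈ P, pvCell g p = w ∧ pvNbr p q

-- h is g overlaid with value w+1 exactly on the cells of W (all of which are 0 in g)
def pvOv (N M : Nat) (g : List (List Int)) (w : Int) (W : Nat × Nat → Prop)
    (h : List (List Int)) : Prop :=
  pvShape N M h ∧ (∀ q, W q → pvCell g q = 0 ∧ pvCell h q = w + 1)
    ∧ (∀ q, ¬ W q → pvCell h q = pvCell g q)

theorem pvGetD_set_self {alpha : Type} (l : List alpha) (n : Nat) (a d : alpha)
    (h : n < l.length) : (l.set n a).getD n d = a := by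
  simp [List.getD_eq_getElem?_getD, List.getElem?_set_self h]

theorem pvGetD_set_ne {alpha : Type} (l : List alpha) {m n : Nat} (a d : alpha)
    (h : m ≠ n) : (l.set n a).getD m d = l.getD m d := by
  simp [List.getD_eq_getElem?_getD, List.getElem?_set_ne (fun hnm => h hnm.symm)]

theorem pvShape_rowlen {N M : Nat} {g : List (List Int)} (hs : pvShape N M g)
    {y : Nat} (hy : y < N) : (g.getD y []).length = M := hs.2 y hy

theorem pvShape_pvSet2 {N M : Nat} {g : List (List Int)} (hs : pvShape N M g)
    (y x : Nat) (v : Int) : pvShape N M (pvSet2 g y x v) := by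
  rcases hs with ⟨hl, hr⟩
  refine ⟨by simpa [pvSet2] using hl, ?_⟩
  intro y' hy'
  unfold pvSet2
  by_cases h : y' = y
  · subst h
    rw [pvGetD_set_self g y' _ [] (by omega), List.length_set]
    exact hr y' hy'
  · rw [pvGetD_set_ne g _ [] h]
    exact hr y' hy'

theorem pvCell_pvSet2 {g : List (List Int)} {y x : Nat} (hy : y < g.length)
    (hx : x < (g.getD y []).length) (v : Int) (q : Nat × Nat) :
    pvCell (pvSet2 g y x v) q = if q = (y, x) then v else pvCell g q := by
  rcases q with ⟨qy, qx⟩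
  simp only [pvCell, pvSet2, Prod.mk.injEq]
  by_cases hqy : qy = y
  · subst hqy
    rw [pvGetD_set_self g qy _ [] hy]
    by_cases hqx : qx = x
    · subst hqx
      rw [if_pos ⟨rfl, rfl⟩, pvGetD_set_self _ qx _ 0 hx]
    · rw [if_neg (by simp [hqx]), pvGetD_set_ne _ _ 0 hqx]
  · rw [if_neg (by simp [hqy]), pvGetD_set_ne g _ [] hqy]

theorem pvOv_congr {N M : Nat} {g : List (List Int)} {w : Int} {W W' : Nat × Nat → Prop}
    {h : List (List Int)} (hiff : ∀ q, W q ↔ W' q) (hov : pvOv N M g w W h) :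
    pvOv N M g w W' h := by
  refine ⟨hov.1, fun q hq => hov.2.1 q ((hiff q).mpr hq), fun q hq => hov.2.2 q (fun c => hq ((hiff q).mp c))⟩

theorem pvOv_refl {N M : Nat} {g : List (List Int)} (w : Int) (hsg : pvShape N M g) :
    pvOv N M g w (fun _ => False) g :=
  ⟨hsg, fun _ hq => hq.elim, fun _ _ => rfl⟩

theorem pvOv_cell_w {N M : Nat} {g : List (List Int)} {w : Int} {W : Nat × Nat → Prop}
    {h : List (List Int)} (hw : 1 ≤ w) (hov : pvOv N M g w W h) (q : Nat × Nat) :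
    pvCell h q = w ↔ pvCell g q = w := by
  by_cases hWq : W q
  · obtain ⟨h0, h1⟩ := hov.2.1 q hWq
    constructor <;> intro hc <;> omega
  · rw [hov.2.2 q hWq]

theorem pvOv_cell_zero {N M : Nat} {g : List (List Int)} {w : Int} {W : Nat × Nat → Prop}
    {h : List (List Int)} (hw : 1 ≤ w) (hov : pvOv N M g w W h) (q : Nat × Nat) :
    pvCell h q = 0 ↔ (pvCell g q = 0 ∧ ¬ W q) := by
  by_cases hWq : W q
  · obtain ⟨h0, h1⟩ := hov.2.1 q hWq
    constructor
    · intro hc; omega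
    · intro hc; exact absurd hWq hc.2
  · rw [hov.2.2 q hWq]; tauto

theorem pvClaimA_ov {N M : Nat} {g h : List (List Int)} {w : Int} (hw : 1 ≤ w)
    {W : Nat × Nat → Prop} (hov : pvOv N M g w W h) (c : Prop) [Decidable c]
    (ny nx : Nat) (hb : c → ny < N ∧ nx < M) :
    pvOv N M g w (fun q => W q ∨ (c ∧ q = (ny, nx) ∧ pvCell g (ny, nx) = 0))
      (pvClaimA h c ny nx (w + 1)) := by
  unfold pvClaimA
  by_cases hc : c
  · by_cases hz : (h.getD ny []).getD nx 0 = 0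
    · rw [if_pos ⟨hc, hz⟩]
      have hz' : pvCell h (ny, nx) = 0 := hz
      have hgz : pvCell g (ny, nx) = 0 ∧ ¬ W (ny, nx) := (pvOv_cell_zero hw hov _).mp hz'
      have hny : ny < h.length := by have := hov.1.1; have := (hb hc).1; omega
      have hnx : nx < (h.getD ny []).length := by
        rw [pvShape_rowlen hov.1 (hb hc).1]; exact (hb hc).2
      refine ⟨pvShape_pvSet2 hov.1 ny nx (w + 1), ?_, ?_⟩
      · intro q hq
        rcases hq with hq | ⟨_, hq, hgz'⟩
        · obtain ⟨h0, h1⟩ := hov.2.1 q hq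
          refine ⟨h0, ?_⟩
          rw [pvCell_pvSet2 hny hnx (w + 1) q]
          split
          · rfl
          · exact h1
        · subst hq
          exact ⟨hgz', by rw [pvCell_pvSet2 hny hnx (w + 1) _]; simp⟩
      · intro q hq
        push Not at hq
        rw [pvCell_pvSet2 hny hnx (w + 1) q, if_neg, hov.2.2 q hq.1]
        intro hqe
        exact (hq.2 hc hqe) hgz.1
    · rw [if_neg (fun hand => hz hand.2)]
      refine ⟨hov.1, ?_, ?_⟩
      · intro q hq
        rcases hq with hq | ⟨_, hq, hgz'⟩
        · exact hov.2.1 q hq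
        · subst hq
          by_cases hWq : W (ny, nx)
          · exact hov.2.1 _ hWq
          · exact absurd ((pvOv_cell_zero hw hov _).mpr ⟨hgz', hWq⟩) hz
      · intro q hq
        push Not at hq
        exact hov.2.2 q hq.1
  · rw [if_neg (fun hand => hc hand.1)]
    exact pvOv_congr (fun q => by tauto) hov

theorem pvWr_append {N M : Nat} {g : List (List Int)} {w : Int} (P1 P2 : List (Nat × Nat))
    (q : Nat × Nat) : pvWr N M g w (P1 ++ P2) q ↔ pvWr N M g w P1 q ∨ pvWr N M g w P2 q := by
  simp only [pvWr, List.mem_append]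
  constructor
  · rintro ⟨h1, h2, h3, p, (hp | hp), hpv⟩
    · exact Or.inl ⟨h1, h2, h3, p, hp, hpv⟩
    · exact Or.inr ⟨h1, h2, h3, p, hp, hpv⟩
  · rintro (⟨h1, h2, h3, p, hp, hpv⟩ | ⟨h1, h2, h3, p, hp, hpv⟩)
    · exact ⟨h1, h2, h3, p, Or.inl hp, hpv⟩
    · exact ⟨h1, h2, h3, p, Or.inr hp, hpv⟩

theorem pvWr_nil {N M : Nat} {g : List (List Int)} {w : Int} (q : Nat × Nat) :
    ¬ pvWr N M g w [] q := by simp [pvWr]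

theorem pvWr_single {N M : Nat} {g : List (List Int)} {w : Int} {y x : Nat}
    (hy : y < N) (hx : x < M) (hcw : pvCell g (y, x) = w) (q : Nat × Nat) :
    pvWr N M g w [(y, x)] q ↔
      ((0 < y ∧ q = (y - 1, x) ∧ pvCell g (y - 1, x) = 0) ∨
       (y + 1 < N ∧ q = (y + 1, x) ∧ pvCell g (y + 1, x) = 0) ∨
       (0 < x ∧ q = (y, x - 1) ∧ pvCell g (y, x - 1) = 0) ∨
       (x + 1 < M ∧ q = (y, x + 1) ∧ pvCell g (y, x + 1) = 0)) := by
  rcases q with ⟨qy, qx⟩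
  simp only [pvWr, pvNbr, List.mem_singleton, Prod.mk.injEq]
  constructor
  · rintro ⟨h1, h2, h3, p, hp, hpw, hnbr⟩
    subst hp
    rcases hnbr with ⟨he, hv | hv⟩ | ⟨he, hv | hv⟩
    · refine Or.inl ⟨by omega, ⟨by omega, by omega⟩, ?_⟩
      have e1 : y - 1 = qy := by omega
      have e2 : x = qx := by omega
      rw [e1, e2]; exact h3
    · refine Or.inr (Or.inl ⟨by omega, ⟨by omega, by omega⟩, ?_⟩)
      have e1 : y + 1 = qy := by omega
      have e2 : x = qx := by omega
      rw [e1, e2]; exact h3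
    · refine Or.inr (Or.inr (Or.inl ⟨by omega, ⟨by omega, by omega⟩, ?_⟩))
      have e1 : y = qy := by omega
      have e2 : x - 1 = qx := by omega
      rw [e1, e2]; exact h3
    · refine Or.inr (Or.inr (Or.inr ⟨by omega, ⟨by omega, by omega⟩, ?_⟩))
      have e1 : y = qy := by omega
      have e2 : x + 1 = qx := by omega
      rw [e1, e2]; exact h3
  · rintro (⟨hb, ⟨h1, h2⟩, h0⟩ | ⟨hb, ⟨h1, h2⟩, h0⟩ | ⟨hb, ⟨h1, h2⟩, h0⟩ | ⟨hb, ⟨h1, h2⟩, h0⟩) <;>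
      refine ⟨by omega, by omega, by rw [h1, h2]; exact h0, (y, x), rfl, hcw, ?_⟩ <;>
      omega

theorem foundCell_spec {N M : Nat} (finPoint : List Int) {w : Int} (hw : 1 ≤ w)
    {g h : List (List Int)} {W : Nat × Nat → Prop} (hov : pvOv N M g w W h)
    {y x : Nat} (hy : y < N) (hx : x < M) :
    (pvCell g (y, x) = w ∧
        pvHit (PySem.List.pyGetD finPoint 0 0) (PySem.List.pyGetD finPoint 1 0) (y, x) →
      foundCell finPoint w h y x = none) ∧
    (¬ (pvCell g (y, x) = w ∧
        pvHit (PySem.List.pyGetD finPoint 0 0) (PySem.List.pyGetD finPoint 1 0) (y, x)) →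
      ∃ h', foundCell finPoint w h y x = some h' ∧
        pvOv N M g w (fun q => W q ∨ pvWr N M g w [(y, x)] q) h') := by
  by_cases hcw : pvCell g (y, x) = w
  · have hcw' : (h.getD y []).getD x 0 = w := (pvOv_cell_w hw hov (y, x)).mpr hcw
    have o1 := pvClaimA_ov hw hov (0 < y) (y - 1) x (fun _ => ⟨by omega, hx⟩)
    have hlen1 : (pvClaimA h (0 < y) (y - 1) x (w + 1)).length = N := o1.1.1
    have o2 := pvClaimA_ov hw o1 (y < (pvClaimA h (0 < y) (y - 1) x (w + 1)).length - 1) (y + 1) x (fun hc => ⟨by omega, hx⟩)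
    have o3 := pvClaimA_ov hw o2 (0 < x) y (x - 1) (fun _ => ⟨hy, by omega⟩)
    have hrow3 : ((pvClaimA (pvClaimA (pvClaimA h (0 < y) (y - 1) x (w + 1)) (y < (pvClaimA h (0 < y) (y - 1) x (w + 1)).length - 1) (y + 1) x (w + 1)) (0 < x) y (x - 1) (w + 1)).getD y []).length = M := pvShape_rowlen o3.1 hy
    have o4 := pvClaimA_ov hw o3 (x < ((pvClaimA (pvClaimA (pvClaimA h (0 < y) (y - 1) x (w + 1)) (y < (pvClaimA h (0 < y) (y - 1) x (w + 1)).length - 1) (y + 1) x (w + 1)) (0 < x) y (x - 1) (w + 1)).getD y []).length - 1) y (x + 1)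
      (fun hc => ⟨hy, by omega⟩)
    have hfc : foundCell finPoint w h y x =
        if ((y : Int) - PySem.List.pyGetD finPoint 0 0).natAbs
            + ((x : Int) - PySem.List.pyGetD finPoint 1 0).natAbs = 1 then none
        else some (pvClaimA (pvClaimA (pvClaimA (pvClaimA h (0 < y) (y - 1) x (w + 1)) (y < (pvClaimA h (0 < y) (y - 1) x (w + 1)).length - 1) (y + 1) x (w + 1)) (0 < x) y (x - 1) (w + 1)) (x < ((pvClaimA (pvClaimA (pvClaimA h (0 < y) (y - 1) x (w + 1)) (y < (pvClaimA h (0 < y) (y - 1) x (w + 1)).length - 1) (y + 1) x (w + 1)) (0 < x) y (x - 1) (w + 1)).getD y []).length - 1) y (x + 1) (w + 1)) := by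
      unfold foundCell
      rw [if_pos hcw']
    have hWiff : ∀ q, (((W q ∨ (0 < y ∧ q = (y - 1, x) ∧ pvCell g (y - 1, x) = 0)) ∨
          (y < (pvClaimA h (0 < y) (y - 1) x (w + 1)).length - 1 ∧ q = (y + 1, x) ∧ pvCell g (y + 1, x) = 0)) ∨
          (0 < x ∧ q = (y, x - 1) ∧ pvCell g (y, x - 1) = 0)) ∨
          (x < ((pvClaimA (pvClaimA (pvClaimA h (0 < y) (y - 1) x (w + 1)) (y < (pvClaimA h (0 < y) (y - 1) x (w + 1)).length - 1) (y + 1) x (w + 1)) (0 < x) y (x - 1) (w + 1)).getD y []).length - 1 ∧ q = (y, x + 1) ∧ pvCell g (y, x + 1) = 0) ↔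
        W q ∨ pvWr N M g w [(y, x)] q := by
      intro q
      rw [pvWr_single hy hx hcw q, hrow3, hlen1]
      constructor
      · rintro ((((hW | h1) | ⟨hb, h2⟩) | h3) | ⟨hb, h4⟩)
        · exact Or.inl hW
        · exact Or.inr (Or.inl h1)
        · exact Or.inr (Or.inr (Or.inl ⟨by omega, h2⟩))
        · exact Or.inr (Or.inr (Or.inr (Or.inl h3)))
        · exact Or.inr (Or.inr (Or.inr (Or.inr ⟨by omega, h4⟩)))
      · rintro (hW | (h1 | ⟨hb, h2⟩ | h3 | ⟨hb, h4⟩))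
        · exact Or.inl (Or.inl (Or.inl (Or.inl hW)))
        · exact Or.inl (Or.inl (Or.inl (Or.inr h1)))
        · exact Or.inl (Or.inl (Or.inr ⟨by omega, h2⟩))
        · exact Or.inl (Or.inr h3)
        · exact Or.inr ⟨by omega, h4⟩
    constructor
    · rintro ⟨-, hhit⟩
      have hhit' : ((y : Int) - PySem.List.pyGetD finPoint 0 0).natAbs
          + ((x : Int) - PySem.List.pyGetD finPoint 1 0).natAbs = 1 := hhit
      rw [hfc, if_pos hhit']
    · intro hne
      have hnh : ¬ (((y : Int) - PySem.List.pyGetD finPoint 0 0).natAbs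
          + ((x : Int) - PySem.List.pyGetD finPoint 1 0).natAbs = 1) :=
        fun hh => hne ⟨hcw, hh⟩
      exact ⟨pvClaimA (pvClaimA (pvClaimA (pvClaimA h (0 < y) (y - 1) x (w + 1)) (y < (pvClaimA h (0 < y) (y - 1) x (w + 1)).length - 1) (y + 1) x (w + 1)) (0 < x) y (x - 1) (w + 1)) (x < ((pvClaimA (pvClaimA (pvClaimA h (0 < y) (y - 1) x (w + 1)) (y < (pvClaimA h (0 < y) (y - 1) x (w + 1)).length - 1) (y + 1) x (w + 1)) (0 < x) y (x - 1) (w + 1)).getD y []).length - 1) y (x + 1) (w + 1), by rw [hfc, if_neg hnh], pvOv_congr hWiff o4⟩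
  · have hcw' : ¬ ((h.getD y []).getD x 0 = w) :=
      fun hh => hcw ((pvOv_cell_w hw hov (y, x)).mp hh)
    constructor
    · rintro ⟨h1, -⟩
      exact absurd h1 hcw
    · intro _
      refine ⟨h, by unfold foundCell; rw [if_neg hcw'], pvOv_congr (fun q => ?_) hov⟩
      constructor
      · exact Or.inl
      · rintro (hq | ⟨-, -, -, p, hp, hpw, -⟩)
        · exact hq
        · rw [List.mem_singleton] at hp
          subst hp
          exact absurd hpw hcw

theorem pvFoldl_none {alpha beta : Type} (l : List alpha) (f : alpha → beta → Option beta) :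
    l.foldl (fun st a => st.bind (fun s => f a s)) none = none := by
  induction l with
  | nil => rfl
  | cons a l ih => simpa using ih

-- scanning a list of cells of one row
theorem pvRow_fold_spec {N M : Nat} (finPoint : List Int) {w : Int} (hw : 1 ≤ w)
    {g : List (List Int)} {y : Nat} (hy : y < N) :
    ∀ (xs : List Nat) (h : List (List Int)) (W : Nat × Nat → Prop),
      (∀ x ∈ xs, x < M) → pvOv N M g w W h →
      (xs.foldl (fun st x => st.bind (fun g => foundCell finPoint w g y x)) (some h) = none ∧
         ∃ x ∈ xs, pvCell g (y, x) = w ∧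
           pvHit (PySem.List.pyGetD finPoint 0 0) (PySem.List.pyGetD finPoint 1 0) (y, x)) ∨
      (∃ h', xs.foldl (fun st x => st.bind (fun g => foundCell finPoint w g y x)) (some h) = some h' ∧
         (¬ ∃ x ∈ xs, pvCell g (y, x) = w ∧
            pvHit (PySem.List.pyGetD finPoint 0 0) (PySem.List.pyGetD finPoint 1 0) (y, x)) ∧
         pvOv N M g w (fun q => W q ∨ pvWr N M g w (xs.map (fun x => (y, x))) q) h') := by
  intro xs
  induction xs with
  | nil =>
    intro h W hxs hov
    refine Or.inr ⟨h, rfl, by simp, pvOv_congr (fun q => ?_) hov⟩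
    have := pvWr_nil (N := N) (M := M) (g := g) (w := w) q
    tauto
  | cons x xs ih =>
    intro h W hxs hov
    have hx : x < M := hxs x (List.mem_cons_self)
    obtain ⟨hcnone, hcsome⟩ := foundCell_spec finPoint hw hov hy hx
    by_cases hcase : pvCell g (y, x) = w ∧
        pvHit (PySem.List.pyGetD finPoint 0 0) (PySem.List.pyGetD finPoint 1 0) (y, x)
    · refine Or.inl ⟨?_, x, List.mem_cons_self, hcase⟩
      simp only [List.foldl_cons, Option.bind_some, hcnone hcase]
      exact pvFoldl_none xs _
    · obtain ⟨h1, hfc, hov1⟩ := hcsome hcase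
      have hrest := ih h1 _ (fun x' hx' => hxs x' (List.mem_cons_of_mem _ hx')) hov1
      simp only [List.foldl_cons, Option.bind_some, hfc]
      rcases hrest with ⟨hnone, x', hx', hcw'⟩ | ⟨h', hsome, hnoex, hov'⟩
      · exact Or.inl ⟨hnone, x', List.mem_cons_of_mem _ hx', hcw'⟩
      · refine Or.inr ⟨h', hsome, ?_, pvOv_congr (fun q => ?_) hov'⟩
        · rintro ⟨x', hx', hcw'⟩
          rcases List.mem_cons.mp hx' with rfl | hx'
          · exact hcase hcw'
          · exact hnoex ⟨x', hx', hcw'⟩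
        · have : (x :: xs).map (fun x => (y, x)) = [(y, x)] ++ xs.map (fun x => (y, x)) := rfl
          rw [this, pvWr_append]
          tauto

-- scanning a list of whole rows
theorem pvScan_fold_spec {N M : Nat} (finPoint : List Int) {w : Int} (hw : 1 ≤ w)
    {g : List (List Int)} :
    ∀ (ys : List Nat) (h : List (List Int)) (W : Nat × Nat → Prop),
      (∀ y ∈ ys, y < N) → pvOv N M g w W h →
      (ys.foldl (fun st y => st.bind (fun g => foundRow finPoint w y g)) (some h) = none ∧
         ∃ y ∈ ys, ∃ x, x < M ∧ pvCell g (y, x) = w ∧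
           pvHit (PySem.List.pyGetD finPoint 0 0) (PySem.List.pyGetD finPoint 1 0) (y, x)) ∨
      (∃ h', ys.foldl (fun st y => st.bind (fun g => foundRow finPoint w y g)) (some h) = some h' ∧
         (¬ ∃ y ∈ ys, ∃ x, x < M ∧ pvCell g (y, x) = w ∧
            pvHit (PySem.List.pyGetD finPoint 0 0) (PySem.List.pyGetD finPoint 1 0) (y, x)) ∧
         pvOv N M g w (fun q => W q ∨
            pvWr N M g w (ys.flatMap (fun y => (List.range M).map (fun x => (y, x)))) q) h') := by
  intro ys
  induction ys with
  | nil =>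
    intro h W hys hov
    refine Or.inr ⟨h, rfl, by simp, pvOv_congr (fun q => ?_) hov⟩
    have := pvWr_nil (N := N) (M := M) (g := g) (w := w) q
    simp only [List.flatMap_nil]
    tauto
  | cons y ys ih =>
    intro h W hys hov
    have hy : y < N := hys y (List.mem_cons_self)
    have hrowlen : (h.getD y []).length = M := pvShape_rowlen hov.1 hy
    have hrow : foundRow finPoint w y h =
        (List.range M).foldl (fun st x => st.bind (fun g => foundCell finPoint w g y x)) (some h) := by
      unfold foundRow
      rw [hrowlen]
    have hr := pvRow_fold_spec finPoint hw hy (List.range M) h W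
      (fun x hx => List.mem_range.mp hx) hov
    simp only [List.foldl_cons, Option.bind_some, hrow]
    rcases hr with ⟨hnone, x, hx, hcw⟩ | ⟨h1, hsome, hnoex1, hov1⟩
    · rw [hnone]
      exact Or.inl ⟨pvFoldl_none ys _, y, List.mem_cons_self, x, List.mem_range.mp hx, hcw⟩
    · rw [hsome]
      have hrest := ih h1 _ (fun y' hy' => hys y' (List.mem_cons_of_mem _ hy')) hov1
      rcases hrest with ⟨hnone, y', hy', hex⟩ | ⟨h', hsome', hnoex, hov'⟩
      · exact Or.inl ⟨hnone, y', List.mem_cons_of_mem _ hy', hex⟩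
      · refine Or.inr ⟨h', hsome', ?_, pvOv_congr (fun q => ?_) hov'⟩
        · rintro ⟨y', hy', x', hx', hcw'⟩
          rcases List.mem_cons.mp hy' with rfl | hy'
          · exact hnoex1 ⟨x', List.mem_range.mpr hx', hcw'⟩
          · exact hnoex ⟨y', hy', x', hx', hcw'⟩
        · have : (y :: ys).flatMap (fun y => (List.range M).map (fun x => (y, x))) =
              (List.range M).map (fun x => (y, x)) ++
                ys.flatMap (fun y => (List.range M).map (fun x => (y, x))) := rfl
          rw [this, pvWr_append]
          tauto

-- the whole scan at weight w, summarized against the base grid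
def pvWrAll (N M : Nat) (g : List (List Int)) (w : Int) (q : Nat × Nat) : Prop :=
  q.1 < N ∧ q.2 < M ∧ pvCell g q = 0 ∧
    ∃ p : Nat × Nat, p.1 < N ∧ p.2 < M ∧ pvCell g p = w ∧ pvNbr p q

theorem pvMem_rowMajor {N M : Nat} (p : Nat × Nat) :
    p ∈ (List.range N).flatMap (fun y => (List.range M).map (fun x => (y, x))) ↔
      p.1 < N ∧ p.2 < M := by
  rcases p with ⟨py, px⟩
  simp [List.mem_flatMap, List.mem_range, List.mem_map]

theorem foundScan_spec {N M : Nat} (finPoint : List Int) {w : Int} (hw : 1 ≤ w)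
    {g : List (List Int)} (hsg : pvShape N M g) :
    (foundScan finPoint w g = none ∧ ∃ p : Nat × Nat, p.1 < N ∧ p.2 < M ∧ pvCell g p = w ∧
       pvHit (PySem.List.pyGetD finPoint 0 0) (PySem.List.pyGetD finPoint 1 0) p) ∨
    (∃ g', foundScan finPoint w g = some g' ∧
       (¬ ∃ p : Nat × Nat, p.1 < N ∧ p.2 < M ∧ pvCell g p = w ∧
          pvHit (PySem.List.pyGetD finPoint 0 0) (PySem.List.pyGetD finPoint 1 0) p) ∧
       pvOv N M g w (pvWrAll N M g w) g') := by
  have hlen : g.length = N := hsg.1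
  have hfold : foundScan finPoint w g =
      (List.range N).foldl (fun st y => st.bind (fun g => foundRow finPoint w y g)) (some g) := by
    unfold foundScan
    rw [hlen]
  have hs := pvScan_fold_spec finPoint hw (List.range N) g (fun _ => False)
    (fun y hy => List.mem_range.mp hy) (pvOv_refl w hsg)
  rcases hs with ⟨hnone, y, hy, x, hx, hcw⟩ | ⟨g', hsome, hnoex, hov⟩
  · refine Or.inl ⟨by rw [hfold]; exact hnone, (y, x), List.mem_range.mp hy, hx, hcw⟩
  · refine Or.inr ⟨g', by rw [hfold]; exact hsome, ?_, pvOv_congr (fun q => ?_) hov⟩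
    · rintro ⟨⟨py, px⟩, h1, h2, h3, h4⟩
      exact hnoex ⟨py, List.mem_range.mpr h1, px, h2, h3, h4⟩
    · unfold pvWr pvWrAll
      constructor
      · rintro (hF | ⟨h1, h2, h3, p, hp, hpv⟩)
        · exact hF.elim
        · exact ⟨h1, h2, h3, p, (pvMem_rowMajor p).mp hp |>.1, ((pvMem_rowMajor p).mp hp).2, hpv⟩
      · rintro ⟨h1, h2, h3, p, hp1, hp2, hpv⟩
        exact Or.inr ⟨h1, h2, h3, p, (pvMem_rowMajor p).mpr ⟨hp1, hp2⟩, hpv⟩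

-- "p is an in-bounds free cell of the original grid" (B's claim test)
def pvOkB (pathArr : List (List Int)) (n : Nat) (q : Int × Int) : Prop :=
  0 ≤ q.1 ∧ q.1 < (n : Int) ∧ 0 ≤ q.2 ∧ q.2 < ((pathArr.getD q.1.toNat []).length : Int) ∧
    (pathArr.getD q.1.toNat []).getD q.2.toNat 0 = 0

theorem pvMem_nbrs (c q : Int × Int) :
    q ∈ [(c.1 - 1, c.2), (c.1 + 1, c.2), (c.1, c.2 - 1), (c.1, c.2 + 1)] ↔
      (c.1 - q.1).natAbs + (c.2 - q.2).natAbs = 1 := by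
  rcases c with ⟨cy, cx⟩
  rcases q with ⟨qy, qx⟩
  simp [Prod.ext_iff]
  omega

theorem pvAltClaim_fold_mem (pathArr : List (List Int)) (n : Nat) :
    ∀ (ns : List (Int × Int)) (st : PySem.Set (Int × Int) × List (Int × Int)) (q : Int × Int),
      (q ∈ (ns.foldl (pvAltClaim pathArr n) st).1 ↔
        q ∈ st.1 ∨ (q ∈ ns ∧ pvOkB pathArr n q)) ∧
      (q ∈ (ns.foldl (pvAltClaim pathArr n) st).2 ↔
        q ∈ st.2 ∨ (q ∈ ns ∧ pvOkB pathArr n q ∧ q ∉ st.1)) := by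
  intro ns
  induction ns with
  | nil => intro st q; simp
  | cons p ns ih =>
    intro st q
    rw [List.foldl_cons]
    obtain ⟨ih1, ih2⟩ := ih (pvAltClaim pathArr n st p) q
    have hstep : (pvAltClaim pathArr n st p =
        (st.1.add p, st.2 ++ [p]) ∧ pvOkB pathArr n p ∧ p ∉ st.1) ∨
        (pvAltClaim pathArr n st p = st ∧ ¬ (pvOkB pathArr n p ∧ p ∉ st.1)) := by
      unfold pvAltClaim
      by_cases hc : 0 ≤ p.1 ∧ p.1 < (n : Int) ∧ 0 ≤ p.2 ∧
          p.2 < ((pathArr.getD p.1.toNat []).length : Int) ∧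
          (pathArr.getD p.1.toNat []).getD p.2.toNat 0 = 0 ∧ p ∉ st.1
      · rw [if_pos hc]
        exact Or.inl ⟨rfl, ⟨hc.1, hc.2.1, hc.2.2.1, hc.2.2.2.1, hc.2.2.2.2.1⟩, hc.2.2.2.2.2⟩
      · rw [if_neg hc]
        refine Or.inr ⟨rfl, fun hh => hc ?_⟩
        obtain ⟨⟨h1, h2, h3, h4, h5⟩, h6⟩ := hh
        exact ⟨h1, h2, h3, h4, h5, h6⟩
    clear ih1 ih2
    rcases hstep with ⟨heq, hok, hnm⟩ | ⟨heq, hno⟩ <;> rw [heq] <;>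
      rw [(ih _ q).1, (ih _ q).2] <;> constructor <;>
      simp only [PySem.Set.mem_add, List.mem_append, List.mem_cons] <;>
      by_cases hq : q = p <;> subst_eqs <;> tauto

theorem pvAltWave_fold_spec (pathArr : List (List Int)) (n : Nat) (finPoint : List Int) :
    ∀ (frontier : List (Int × Int)) (st : PySem.Set (Int × Int) × List (Int × Int)),
      (frontier.foldl (fun st c => st.bind (fun s => pvAltCell pathArr n finPoint s c))
          (some st) = none ∧
        ∃ c ∈ frontier, (c.1 - PySem.List.pyGetD finPoint 0 0).natAbs
          + (c.2 - PySem.List.pyGetD finPoint 1 0).natAbs = 1) ∨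
      (∃ cl car, frontier.foldl (fun st c => st.bind (fun s => pvAltCell pathArr n finPoint s c))
          (some st) = some (cl, car) ∧
        (¬ ∃ c ∈ frontier, (c.1 - PySem.List.pyGetD finPoint 0 0).natAbs
          + (c.2 - PySem.List.pyGetD finPoint 1 0).natAbs = 1) ∧
        (∀ q, q ∈ cl ↔ q ∈ st.1 ∨ (pvOkB pathArr n q ∧
            ∃ c ∈ frontier, (c.1 - q.1).natAbs + (c.2 - q.2).natAbs = 1)) ∧
        (∀ q, q ∈ car ↔ q ∈ st.2 ∨ (pvOkB pathArr n q ∧ q ∉ st.1 ∧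
            ∃ c ∈ frontier, (c.1 - q.1).natAbs + (c.2 - q.2).natAbs = 1))) := by
  intro frontier
  induction frontier with
  | nil =>
    intro st
    exact Or.inr ⟨st.1, st.2, rfl, by simp, fun q => by simp, fun q => by simp⟩
  | cons c frontier ih =>
    intro st
    rw [List.foldl_cons, Option.bind_some]
    by_cases hhit : (c.1 - PySem.List.pyGetD finPoint 0 0).natAbs
        + (c.2 - PySem.List.pyGetD finPoint 1 0).natAbs = 1
    · have : pvAltCell pathArr n finPoint st c = none := by
        unfold pvAltCell
        rw [if_pos hhit]
      rw [this]
      exact Or.inl ⟨pvFoldl_none _ _, c, List.mem_cons_self, hhit⟩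
    · have hcell : pvAltCell pathArr n finPoint st c =
          some ([(c.1 - 1, c.2), (c.1 + 1, c.2), (c.1, c.2 - 1), (c.1, c.2 + 1)].foldl
            (pvAltClaim pathArr n) st) := by
        unfold pvAltCell
        rw [if_neg hhit]
      rw [hcell]
      have hcl := pvAltClaim_fold_mem pathArr n
        [(c.1 - 1, c.2), (c.1 + 1, c.2), (c.1, c.2 - 1), (c.1, c.2 + 1)] st
      rcases ih ([(c.1 - 1, c.2), (c.1 + 1, c.2), (c.1, c.2 - 1), (c.1, c.2 + 1)].foldl
          (pvAltClaim pathArr n) st) with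
        ⟨hnone, c', hc', hhit'⟩ | ⟨cl, car, hsome, hnoex, hclm, hcarm⟩
      · exact Or.inl ⟨hnone, c', List.mem_cons_of_mem _ hc', hhit'⟩
      · refine Or.inr ⟨cl, car, hsome, ?_, fun q => ?_, fun q => ?_⟩
        · rintro ⟨c', hc', hhit'⟩
          rcases List.mem_cons.mp hc' with rfl | hc'
          · exact hhit hhit'
          · exact hnoex ⟨c', hc', hhit'⟩
        · rw [hclm q, (hcl q).1, pvMem_nbrs c q, List.exists_mem_cons_iff]
          tauto
        · rw [hcarm q, (hcl q).2, (hcl q).1, pvMem_nbrs c q, List.exists_mem_cons_iff]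
          tauto

theorem pvFoldl_ranges {alpha : Type} (f : alpha → Nat × Nat → alpha) (N : Nat) (Mf : Nat → Nat)
    (a : alpha) :
    (List.range N).foldl (fun d y => (List.range (Mf y)).foldl (fun d x => f d (y, x)) d) a
      = ((List.range N).flatMap (fun y => (List.range (Mf y)).map (fun x => (y, x)))).foldl f a := by
  induction N generalizing a with
  | zero => simp
  | succ N ih =>
    rw [List.range_succ, List.foldl_append, List.flatMap_append, List.foldl_append, ih]
    simp [List.foldl_map]

theorem pvSeeds_fold_mem (pathArr : List (List Int)) (limit : Nat) :
    ∀ (ps : List (Nat × Nat)) (d : PySem.Dict Int (List (Int × Int))) (u : Int) (p : Int × Int),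
      p ∈ (ps.foldl (fun d c =>
          let v := (pathArr.getD c.1 []).getD c.2 0
          if 1 ≤ v ∧ v ≤ (limit : Int) then
            d.insert v (d.getD v [] ++ [((c.1 : Int), (c.2 : Int))])
          else d) d).getD u [] ↔
        p ∈ d.getD u [] ∨ ∃ c ∈ ps, pvCell pathArr c = u ∧ p = ((c.1 : Int), (c.2 : Int)) ∧
          1 ≤ u ∧ u ≤ (limit : Int) := by
  intro ps
  induction ps with
  | nil => intro d u p; simp
  | cons c ps ih =>
    intro d u p
    rw [List.foldl_cons, List.exists_mem_cons_iff]
    simp only []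
    by_cases hv : 1 ≤ (pathArr.getD c.1 []).getD c.2 0 ∧
        (pathArr.getD c.1 []).getD c.2 0 ≤ (limit : Int)
    · rw [if_pos hv, ih]
      have hins : ∀ k, (d.insert ((pathArr.getD c.1 []).getD c.2 0)
            (d.getD ((pathArr.getD c.1 []).getD c.2 0) [] ++ [((c.1 : Int), (c.2 : Int))])).getD k []
          = if k = (pathArr.getD c.1 []).getD c.2 0 then
              d.getD ((pathArr.getD c.1 []).getD c.2 0) [] ++ [((c.1 : Int), (c.2 : Int))]
            else d.getD k [] := fun k => PySem.Dict.getD_insert _ _ _ _ _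
      rw [hins u]
      by_cases hu : u = (pathArr.getD c.1 []).getD c.2 0
      · subst hu
        rw [if_pos rfl]
        simp only [List.mem_append, List.mem_singleton]
        have hcell : pvCell pathArr c = (pathArr.getD c.1 []).getD c.2 0 := rfl
        tauto
      · rw [if_neg hu]
        have : ¬ (pvCell pathArr c = u) := fun hh => hu (by rw [← hh]; rfl)
        tauto
    · rw [if_neg hv, ih]
      have : ¬ (pvCell pathArr c = u ∧ 1 ≤ u ∧ u ≤ (limit : Int)) := by
        rintro ⟨h1, h2, h3⟩
        rw [show pvCell pathArr c = (pathArr.getD c.1 []).getD c.2 0 from rfl] at h1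
        rw [h1] at hv
        exact hv ⟨h2, h3⟩
      tauto

theorem pvMem_rowMajorD (pathArr : List (List Int)) (n : Nat) (p : Nat × Nat) :
    p ∈ (List.range n).flatMap (fun y => (List.range (pathArr.getD y []).length).map
        (fun x => (y, x))) ↔
      p.1 < n ∧ p.2 < (pathArr.getD p.1 []).length := by
  rcases p with ⟨py, px⟩
  simp [List.mem_flatMap, List.mem_range, List.mem_map]

theorem pvSeeds_mem (pathArr : List (List Int)) (n limit : Nat) (u : Int) (p : Int × Int) :
    p ∈ (pvAltSeeds pathArr n limit).getD u [] ↔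
      ∃ y x : Nat, y < n ∧ x < (pathArr.getD y []).length ∧ p = ((y : Int), (x : Int)) ∧
        pvCell pathArr (y, x) = u ∧ 1 ≤ u ∧ u ≤ (limit : Int) := by
  have hflat : pvAltSeeds pathArr n limit =
      ((List.range n).flatMap (fun y => (List.range (pathArr.getD y []).length).map
          (fun x => (y, x)))).foldl
        (fun d c =>
          let v := (pathArr.getD c.1 []).getD c.2 0
          if 1 ≤ v ∧ v ≤ (limit : Int) then
            d.insert v (d.getD v [] ++ [((c.1 : Int), (c.2 : Int))])
          else d) PySem.Dict.empty := by
    unfold pvAltSeeds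
    exact pvFoldl_ranges (fun d c =>
      let v := (pathArr.getD c.1 []).getD c.2 0
      if 1 ≤ v ∧ v ≤ (limit : Int) then
        d.insert v (d.getD v [] ++ [((c.1 : Int), (c.2 : Int))])
      else d) n (fun y => (pathArr.getD y []).length) PySem.Dict.empty
  rw [hflat, pvSeeds_fold_mem]
  simp only [PySem.Dict.getD_empty, List.not_mem_nil, false_or]
  constructor
  · rintro ⟨c, hc, h1, h2, h3, h4⟩
    obtain ⟨hy, hx⟩ := (pvMem_rowMajorD pathArr n c).mp hc
    exact ⟨c.1, c.2, hy, hx, by rw [h2], by rw [← h1], h3, h4⟩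
  · rintro ⟨y, x, hy, hx, h1, h2, h3, h4⟩
    exact ⟨(y, x), (pvMem_rowMajorD pathArr n (y, x)).mpr ⟨hy, hx⟩, h2, h1, h3, h4⟩

theorem pvAdjNbr (a b y x : Nat) :
    ((a : Int) - (y : Int)).natAbs + ((b : Int) - (x : Int)).natAbs = 1 ↔
      pvNbr (a, b) (y, x) := by
  simp only [pvNbr]
  omega

-- the coupling invariant at the start of wave w:
--   claimed = the 0-cells of pathArr that A's grid g has overwritten,
--   carried = the cells of value w in g that are not original w-cells
def pvInv (pathArr : List (List Int)) (N M : Nat) (w : Int) (g : List (List Int))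
    (claimed : PySem.Set (Int × Int)) (carried : List (Int × Int)) : Prop :=
  pvShape N M g ∧
  (∀ p ∈ claimed, ∃ y x : Nat, y < N ∧ x < M ∧ p = ((y : Int), (x : Int)) ∧
     pvCell pathArr (y, x) = 0) ∧
  (∀ p ∈ carried, p ∈ claimed) ∧
  (∀ y x : Nat, y < N → x < M → ((y : Int), (x : Int)) ∈ claimed →
     2 ≤ pvCell g (y, x) ∧ pvCell g (y, x) ≤ w ∧
       (pvCell g (y, x) = w ↔ ((y : Int), (x : Int)) ∈ carried)) ∧
  (∀ y x : Nat, y < N → x < M → ((y : Int), (x : Int)) ∉ claimed →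
     pvCell g (y, x) = pvCell pathArr (y, x))

theorem pvFrontier_mem (pathArr : List (List Int)) (N M limit : Nat)
    (hshp : pvShape N M pathArr) {w : Int}
    (hw1 : 1 ≤ w) (hw2 : w ≤ (limit : Int)) {g : List (List Int)}
    {claimed : PySem.Set (Int × Int)} {carried : List (Int × Int)}
    (hinv : pvInv pathArr N M w g claimed carried) (p : Int × Int) :
    p ∈ (pvAltSeeds pathArr N limit).getD w [] ++ carried ↔
      ∃ y x : Nat, y < N ∧ x < M ∧ p = ((y : Int), (x : Int)) ∧ pvCell g (y, x) = w := by
  obtain ⟨hsh, hI2, hI3, hI4, hI5⟩ := hinv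
  rw [List.mem_append, pvSeeds_mem]
  constructor
  · rintro (⟨y, x, hy, hx, hp, hv, -, -⟩ | hcar)
    · rw [pvShape_rowlen hshp hy] at hx
      refine ⟨y, x, hy, hx, hp, ?_⟩
      by_cases hcl : ((y : Int), (x : Int)) ∈ claimed
      · obtain ⟨y', x', hy', hx', he, hv0⟩ := hI2 _ hcl
        have : y' = y ∧ x' = x := by
          constructor <;> [skip; skip] <;>
            (first | (have := congrArg Prod.fst he; omega) | (have := congrArg Prod.snd he; omega))
        obtain ⟨rfl, rfl⟩ := this
        omega
      · rw [hI5 y x hy hx hcl, hv]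
    · have hcl := hI3 _ hcar
      obtain ⟨y, x, hy, hx, hp, hv0⟩ := hI2 _ hcl
      subst hp
      refine ⟨y, x, hy, hx, rfl, ?_⟩
      exact (hI4 y x hy hx hcl).2.2.mpr hcar
  · rintro ⟨y, x, hy, hx, hp, hcw⟩
    subst hp
    by_cases hcl : ((y : Int), (x : Int)) ∈ claimed
    · exact Or.inr ((hI4 y x hy hx hcl).2.2.mp hcw)
    · refine Or.inl ⟨y, x, hy, by rw [pvShape_rowlen hshp hy]; exact hx, rfl, ?_, hw1, hw2⟩
      rw [← hI5 y x hy hx hcl, hcw]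

theorem pvStep (pathArr : List (List Int)) (finPoint : List Int) (N M limit : Nat)
    (hshp : pvShape N M pathArr) {w : Int} (hw1 : 1 ≤ w) (hw2 : w ≤ (limit : Int))
    {g : List (List Int)} {claimed : PySem.Set (Int × Int)} {carried : List (Int × Int)}
    (hinv : pvInv pathArr N M w g claimed carried) :
    (foundScan finPoint w g = none ∧
       pvAltWave pathArr N finPoint
         ((pvAltSeeds pathArr N limit).getD w [] ++ carried) claimed = none) ∨
    (∃ g' cl car, foundScan finPoint w g = some g' ∧
       pvAltWave pathArr N finPoint
         ((pvAltSeeds pathArr N limit).getD w [] ++ carried) claimed = some (cl, car) ∧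
       pvInv pathArr N M (w + 1) g' cl car) := by
  have hF := pvFrontier_mem pathArr N M limit hshp hw1 hw2 hinv
  obtain ⟨hsh, hI2, hI3, hI4, hI5⟩ := hinv
  -- the two hit conditions pick out the same cells
  have hhit_iff : (∃ p : Nat × Nat, p.1 < N ∧ p.2 < M ∧ pvCell g p = w ∧
      pvHit (PySem.List.pyGetD finPoint 0 0) (PySem.List.pyGetD finPoint 1 0) p) ↔
      (∃ c ∈ (pvAltSeeds pathArr N limit).getD w [] ++ carried,
        (c.1 - PySem.List.pyGetD finPoint 0 0).natAbs
          + (c.2 - PySem.List.pyGetD finPoint 1 0).natAbs = 1) := by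
    constructor
    · rintro ⟨⟨y, x⟩, hy, hx, hcw, hhit⟩
      exact ⟨((y : Int), (x : Int)), (hF _).mpr ⟨y, x, hy, hx, rfl, hcw⟩, hhit⟩
    · rintro ⟨c, hc, hhit⟩
      obtain ⟨y, x, hy, hx, rfl, hcw⟩ := (hF _).mp hc
      exact ⟨(y, x), hy, hx, hcw, hhit⟩
  have hwave := pvAltWave_fold_spec pathArr N finPoint
    ((pvAltSeeds pathArr N limit).getD w [] ++ carried) (claimed, [])
  have hscan := foundScan_spec finPoint hw1 hsh (M := M)
  rcases hscan with ⟨hsnone, hex⟩ | ⟨g', hssome, hnoex, hov⟩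
  · rcases hwave with ⟨hwnone, -⟩ | ⟨cl, car, hwsome, hwnoex, -, -⟩
    · exact Or.inl ⟨hsnone, hwnone⟩
    · exact absurd (hhit_iff.mp hex) hwnoex
  · rcases hwave with ⟨hwnone, hexB⟩ | ⟨cl, car, hwsome, hwnoex, hclm, hcarm⟩
    · exact absurd (hhit_iff.mpr hexB) hnoex
    · refine Or.inr ⟨g', cl, car, hssome, hwsome, ?_⟩
      -- rebuild the invariant at w + 1
      obtain ⟨hsh', hovW, hovN⟩ := hov
      -- carried part of the start state is [] so hcarm loses its first disjunct
      simp only [List.not_mem_nil, false_or] at hcarm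
      simp only [] at hclm
      refine ⟨hsh', ?_, ?_, ?_, ?_⟩
      · -- I2
        intro p hp
        rcases (hclm p).mp hp with hp | ⟨hok, -⟩
        · exact hI2 _ hp
        · obtain ⟨h1, h2, h3, h4, h5⟩ := hok
          have hyN : p.1.toNat < N := by omega
          have hrl : (pathArr.getD p.1.toNat []).length = M := pvShape_rowlen hshp hyN
          rw [hrl] at h4
          refine ⟨p.1.toNat, p.2.toNat, hyN, by omega, by
            rcases p with ⟨p1, p2⟩
            simp only [Prod.mk.injEq]
            constructor <;> omega, h5⟩
      · -- I3
        intro p hp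
        rcases (hcarm p).mp hp with ⟨hok, hncl, hex⟩
        exact (hclm p).mpr (Or.inr ⟨hok, hex⟩)
      · -- I4
        intro y x hy hx hcl
        by_cases hold : ((y : Int), (x : Int)) ∈ claimed
        · obtain ⟨hb1, hb2, hb3⟩ := hI4 y x hy hx hold
          have hne0 : ¬ pvWrAll N M g w (y, x) := by
            rintro ⟨-, -, h0, -⟩
            omega
          have hgg : pvCell g' (y, x) = pvCell g (y, x) := hovN _ hne0
          rw [hgg]
          refine ⟨hb1, by omega, ?_⟩
          constructor
          · intro hww
            omega
          · intro hcar
            exact absurd hold ((hcarm _).mp hcar).2.1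
        · rcases (hclm _).mp hcl with hcl' | ⟨hok, hex⟩
          · exact absurd hcl' hold
          · have hv0 : pvCell pathArr (y, x) = 0 := by
              have := hok.2.2.2.2
              simpa using this
            have hg0 : pvCell g (y, x) = 0 := by rw [hI5 y x hy hx hold, hv0]
            have hwr : pvWrAll N M g w (y, x) := by
              refine ⟨hy, hx, hg0, ?_⟩
              obtain ⟨c, hc, hadj⟩ := hex
              obtain ⟨py, px, hpy, hpx, rfl, hcw⟩ := (hF _).mp hc
              exact ⟨(py, px), hpy, hpx, hcw, (pvAdjNbr py px y x).mp hadj⟩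
            have hg' : pvCell g' (y, x) = w + 1 := (hovW _ hwr).2
            rw [hg']
            refine ⟨by omega, le_refl _, ?_⟩
            have hcar : ((y : Int), (x : Int)) ∈ car :=
              (hcarm _).mpr ⟨hok, hold, hex⟩
            exact ⟨fun _ => hcar, fun _ => rfl⟩
      · -- I5
        intro y x hy hx hcl
        have hold : ((y : Int), (x : Int)) ∉ claimed :=
          fun hc => hcl ((hclm _).mpr (Or.inl hc))
        have hnwr : ¬ pvWrAll N M g w (y, x) := by
          rintro ⟨-, -, hg0, p, hp1, hp2, hpw, hnbr⟩
          refine hcl ((hclm _).mpr (Or.inr ⟨?_, ?_⟩))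
          · have hrl : (pathArr.getD ((y : Int)).toNat []).length = M := by
              have he : ((y : Int)).toNat = y := Int.toNat_natCast y
              rw [he]
              exact pvShape_rowlen hshp hy
            refine ⟨by omega, by simpa using hy, by omega, by rw [hrl]; simpa using hx, ?_⟩
            have : pvCell pathArr (y, x) = 0 := by rw [← hI5 y x hy hx hold, hg0]
            simpa using this
          · refine ⟨((p.1 : Int), (p.2 : Int)), (hF _).mpr ⟨p.1, p.2, hp1, hp2, rfl, hpw⟩, ?_⟩
            exact (pvAdjNbr p.1 p.2 y x).mpr (by rcases p with ⟨a, b⟩; exact hnbr)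
        rw [hovN _ hnwr]
        exact hI5 y x hy hx hold

theorem pvFoldA_none (finPoint : List Int) (l : List Nat) :
    l.foldl (foundStep finPoint) (none : Option (Int × List (List Int))) = none := by
  induction l with
  | nil => rfl
  | cons a l ih => simpa [foundStep] using ih

theorem pvFoldB_none (pathArr : List (List Int)) (n : Nat) (finPoint : List Int)
    (seeds : PySem.Dict Int (List (Int × Int))) (l : List Nat) :
    l.foldl (pvAltStep pathArr n finPoint seeds)
      (none : Option (PySem.Set (Int × Int) × List (Int × Int))) = none := by
  induction l with
  | nil => rfl
  | cons a l ih => simpa [pvAltStep] using ih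

theorem pvLoop (pathArr : List (List Int)) (finPoint : List Int) (N M limit : Nat)
    (hshp : pvShape N M pathArr) :
    ∀ (cnt i : Nat) (w : Int) (g : List (List Int)) (claimed : PySem.Set (Int × Int))
      (carried : List (Int × Int)), w = (i : Int) + 1 → i + cnt = limit →
      pvInv pathArr N M w g claimed carried →
      ((List.range' i cnt).foldl (foundStep finPoint) (some (w, g))).isNone
        = ((List.range' i cnt).foldl
            (pvAltStep pathArr N finPoint (pvAltSeeds pathArr N limit))
          (some (claimed, carried))).isNone := by
  intro cnt
  induction cnt with
  | zero =>
    intro i w g claimed carried hw hsum hinv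
    rfl
  | succ cnt ih =>
    intro i w g claimed carried hw hsum hinv
    subst hw
    have hw1 : 1 ≤ (i : Int) + 1 := by omega
    have hw2 : (i : Int) + 1 ≤ (limit : Int) := by omega
    rw [List.range'_succ, List.foldl_cons, List.foldl_cons]
    rcases pvStep pathArr finPoint N M limit hshp hw1 hw2 hinv with
      ⟨hsn, hwn⟩ | ⟨g', cl', car', hss, hws, hinv'⟩
    · simp only [foundStep, pvAltStep, hsn, hwn]
      rw [pvFoldA_none, pvFoldB_none]
      rfl
    · simp only [foundStep, pvAltStep, hss, hws]
      have hcast : (i : Int) + 1 + 1 = ((i + 1 : Nat) : Int) + 1 := by push_cast; ring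
      rw [hcast]
      exact ih (i + 1) _ g' cl' car' rfl (by omega) (by rw [← hcast]; exact hinv')

-- rectangular grids: the full coupling
theorem found_eq_rect (pathArr : List (List Int)) (finPoint : List Int)
    (hrect : ∀ row ∈ pathArr, row.length = (pathArr.getD 0 []).length) :
    found pathArr finPoint = found_alt pathArr finPoint := by
  have hsh : pvShape pathArr.length (pathArr.getD 0 []).length pathArr := by
    refine ⟨rfl, fun y hy => ?_⟩
    rw [List.getD_eq_getElem?_getD, List.getElem?_eq_getElem hy, Option.getD_some]
    exact hrect _ (List.getElem_mem hy)
  have hinv0 : pvInv pathArr pathArr.length (pathArr.getD 0 []).length 1 pathArr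
      PySem.Set.empty [] := by
    refine ⟨hsh, ?_, ?_, ?_, ?_⟩
    · intro p hp
      simp [PySem.Set.empty] at hp
    · intro p hp
      simp at hp
    · intro y x hy hx hcl
      simp [PySem.Set.empty] at hcl
    · intro y x hy hx hcl
      rfl
  have hloop := pvLoop pathArr finPoint pathArr.length (pathArr.getD 0 []).length
    (pathArr.length * (pathArr.getD 0 []).length) hsh
    (pathArr.length * (pathArr.getD 0 []).length) 0 1 pathArr PySem.Set.empty []
    (by norm_num) (by omega) hinv0
  unfold found found_alt
  simp only [List.range_eq_range']
  exact hloop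

-- quiet grids (no cell value in [1, N*M]): both sides run the loop without any frontier
theorem pvGetD_mem {alpha : Type} (l : List alpha) (i : Nat) (d : alpha)
    (h : i < l.length) : l.getD i d ∈ l := by
  rw [List.getD_eq_getElem?_getD, List.getElem?_eq_getElem h]
  exact List.getElem_mem h

theorem pvGetD_default {alpha : Type} (l : List alpha) (i : Nat) (d : alpha)
    (h : l.length ≤ i) : l.getD i d = d := by
  rw [List.getD_eq_getElem?_getD, List.getElem?_eq_none h]
  rfl

theorem pvQuiet_cell (pathArr : List (List Int))
    (hq : ∀ row ∈ pathArr, ∀ v ∈ row,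
      ¬ (1 ≤ v ∧ v ≤ ((pathArr.length * (pathArr.getD 0 []).length : Nat) : Int)))
    {w : Int} (hw1 : 1 ≤ w)
    (hw2 : w ≤ ((pathArr.length * (pathArr.getD 0 []).length : Nat) : Int)) :
    ∀ y x : Nat, pvCell pathArr (y, x) ≠ w := by
  intro y x
  by_cases hy : y < pathArr.length
  · by_cases hx : x < (pathArr.getD y []).length
    · intro he
      have hmv := hq _ (pvGetD_mem pathArr y [] hy) _ (pvGetD_mem (pathArr.getD y []) x 0 hx)
      rw [show (pathArr.getD y []).getD x 0 = pvCell pathArr (y, x) from rfl, he] at hmv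
      exact hmv ⟨hw1, hw2⟩
    · have h0 : pvCell pathArr (y, x) = 0 := pvGetD_default (pathArr.getD y []) x 0 (by omega)
      intro he
      omega
  · have hrow : pathArr.getD y [] = [] := pvGetD_default pathArr y [] (by omega)
    have h0 : pvCell pathArr (y, x) = 0 := by
      unfold pvCell
      rw [hrow]
      rfl
    intro he
    omega

theorem pvQuiet_scan (finPoint : List Int) (g : List (List Int)) {w : Int}
    (hq : ∀ y x : Nat, pvCell g (y, x) ≠ w) :
    foundScan finPoint w g = some g := by
  have hrow : ∀ y : Nat, ∀ (xs : List Nat),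
      xs.foldl (fun st x => st.bind (fun g => foundCell finPoint w g y x)) (some g) = some g := by
    intro y xs
    induction xs with
    | nil => rfl
    | cons x xs ih =>
      rw [List.foldl_cons, Option.bind_some]
      have : foundCell finPoint w g y x = some g := by
        unfold foundCell
        rw [if_neg (show ¬ ((g.getD y []).getD x 0 = w) from hq y x)]
      rw [this]
      exact ih
  have hscan : ∀ (ys : List Nat),
      ys.foldl (fun st y => st.bind (fun g => foundRow finPoint w y g)) (some g) = some g := by
    intro ys
    induction ys with
    | nil => rfl
    | cons y ys ih =>
      rw [List.foldl_cons, Option.bind_some]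
      have : foundRow finPoint w y g = some g := by
        unfold foundRow
        exact hrow y _
      rw [this]
      exact ih
  unfold foundScan
  exact hscan _

theorem found_eq_quiet (pathArr : List (List Int)) (finPoint : List Int)
    (hq : ∀ row ∈ pathArr, ∀ v ∈ row,
      ¬ (1 ≤ v ∧ v ≤ ((pathArr.length * (pathArr.getD 0 []).length : Nat) : Int))) :
    found pathArr finPoint = found_alt pathArr finPoint := by
  have hseeds : ∀ u : Int,
      (pvAltSeeds pathArr pathArr.length
        (pathArr.length * (pathArr.getD 0 []).length)).getD u [] = [] := by
    intro u
    rw [List.eq_nil_iff_forall_not_mem]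
    intro p hp
    obtain ⟨y, x, hy, hx, -, hv, h1, h2⟩ := (pvSeeds_mem pathArr _ _ u p).mp hp
    exact pvQuiet_cell pathArr hq h1 h2 y x hv
  have hA : ∀ (cnt i : Nat) (w : Int), w = (i : Int) + 1 →
      i + cnt = pathArr.length * (pathArr.getD 0 []).length →
      ((List.range' i cnt).foldl (foundStep finPoint) (some (w, pathArr))).isNone = false := by
    intro cnt
    induction cnt with
    | zero =>
      intro i w hw hsum
      rfl
    | succ cnt ih =>
      intro i w hw hsum
      subst hw
      rw [List.range'_succ, List.foldl_cons]
      have hscan : foundScan finPoint ((i : Int) + 1) pathArr = some pathArr :=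
        pvQuiet_scan finPoint pathArr
          (pvQuiet_cell pathArr hq (by omega) (by omega))
      have hstep : foundStep finPoint (some ((i : Int) + 1, pathArr)) i =
          some ((i : Int) + 1 + 1, pathArr) := by
        simp only [foundStep]
        rw [hscan]
      rw [hstep]
      have hcast : (i : Int) + 1 + 1 = ((i + 1 : Nat) : Int) + 1 := by push_cast; ring
      rw [hcast]
      exact ih (i + 1) _ rfl (by omega)
  have hB : ∀ (cnt i : Nat) (claimed : PySem.Set (Int × Int)),
      ((List.range' i cnt).foldl
        (pvAltStep pathArr pathArr.length finPoint
          (pvAltSeeds pathArr pathArr.length (pathArr.length * (pathArr.getD 0 []).length)))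
        (some (claimed, ([] : List (Int × Int))))).isNone = false := by
    intro cnt
    induction cnt with
    | zero =>
      intro i claimed
      rfl
    | succ cnt ih =>
      intro i claimed
      rw [List.range'_succ, List.foldl_cons]
      have hstep : pvAltStep pathArr pathArr.length finPoint
          (pvAltSeeds pathArr pathArr.length (pathArr.length * (pathArr.getD 0 []).length))
          (some (claimed, ([] : List (Int × Int)))) i = some (claimed, []) := by
        simp only [pvAltStep]
        rw [hseeds ((i : Int) + 1)]
        rfl
      rw [hstep]
      exact ih (i + 1) claimed
  unfold found found_alt
  simp only [List.range_eq_range']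
  rw [show (1 : Int) = ((0 : Nat) : Int) + 1 by norm_num]
  rw [hA (pathArr.length * (pathArr.getD 0 []).length) 0 _ rfl (by omega),
    hB (pathArr.length * (pathArr.getD 0 []).length) 0 PySem.Set.empty]

-- ===== VERDICT (by name: the statement is the Claim_ definition above) =====
theorem found_spec : Claim_equal_found := by
  intro pathArr finPoint _ hpre
  unfold Spec_found
  obtain ⟨hne, hcase⟩ := hpre
  rcases hcase with hq | ⟨hrect, -⟩
  · exact found_eq_quiet pathArr finPoint hq
  · exact found_eq_rect pathArr finPoint hrect
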